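-- pv_equiv track=rewrite | github.com/FMonitor/Algorithm-Design | lab5/drawG.py | find_spanning_tree_and_cycles
-- ===== SOURCE A (Python) =====
-- def find_spanning_tree_and_cycles(n, edges):
--     """找到生成树边和非树边（环边）"""
--     parent = list(range(n))
--
--     def find(x):
--         if parent[x] != x:
--             parent[x] = find(parent[x])
--         return parent[x]
--
--     def union(x, y):
--         px, py = find(x), find(y)
--         if px != py:
--             parent[px] = py
--             return True
--         return False
--
--     tree_edges = []
--     cycle_edges = []
--
--     for u, v in edges:
--         if union(u, v):
--             tree_edges.append((u, v))
--         else: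
--             cycle_edges.append((u, v))
--
--     return tree_edges, cycle_edges
-- ===== SOURCE B (Python) =====
-- def find_spanning_tree_and_cycles(n, edges):
--     """找到生成树边和非树边（环边）"""
--     comp = list(range(n))
--     tree_edges = []
--     cycle_edges = []
--     for u, v in edges:
--         cu, cv = comp[u], comp[v]
--         if cu == cv:
--             cycle_edges.append((u, v))
--         else:
--             comp = [cv if c == cu else c for c in comp]
--             tree_edges.append((u, v))
--     return tree_edges, cycle_edges
-- ===== Notes on version B (the rewrite author's own statement) =====
-- stated objective: simpler
-- what changed: Replaces the recursive union-find with path compression by a flat component-label array: an edge is a cycle edge iff its endpoints carry the same label, otherwise one label is rewritten to the other by a single scan; no recursion, no parent forest.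
import Mathlib
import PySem

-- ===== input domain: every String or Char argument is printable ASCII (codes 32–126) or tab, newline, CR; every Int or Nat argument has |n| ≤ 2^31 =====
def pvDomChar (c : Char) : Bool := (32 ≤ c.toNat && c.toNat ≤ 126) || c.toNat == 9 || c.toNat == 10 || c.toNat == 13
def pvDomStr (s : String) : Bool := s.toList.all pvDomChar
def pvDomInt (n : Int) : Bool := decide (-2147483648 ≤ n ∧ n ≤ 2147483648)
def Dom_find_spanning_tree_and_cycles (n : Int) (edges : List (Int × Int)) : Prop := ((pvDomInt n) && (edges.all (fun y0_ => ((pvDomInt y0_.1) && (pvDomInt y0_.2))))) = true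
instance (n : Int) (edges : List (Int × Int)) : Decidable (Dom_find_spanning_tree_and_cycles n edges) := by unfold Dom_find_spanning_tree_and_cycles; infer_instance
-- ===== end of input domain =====

-- B replaces A's recursive path-compressing union-find by a flat component-label array
-- rewritten by a whole-array scan on each merge (objective: simpler -- no recursion, no parent forest).


-- ===== PORT A =====
-- find(x) with path compression; the Nat fuel only guards the recursion Python runs unbounded
-- (the top-level call passes fuel that is ample for every input admitted by Pre_).
def pvFindA : Nat → List Int → Int → List Int × Int
  | 0, p, x => (p, x)                           -- fuel exhausted: unreachable under Pre_
  | F+1, p, x =>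
    match PySem.List.pyGet? p x with
    | none => (p, x)                            -- IndexError: excluded by Pre_
    | some px =>
      if px = x then (p, px)                    -- return parent[x]
      else
        let r := pvFindA F p px                 -- parent[x] = find(parent[x])
        (PySem.List.pySetD r.1 x r.2, r.2)      -- return parent[x] (just written: = r.2)

def pvUnionA (F : Nat) (p : List Int) (x y : Int) : List Int × Bool :=
  let fx := pvFindA F p x
  let fy := pvFindA F fx.1 y
  if fx.2 ≠ fy.2 then (PySem.List.pySetD fy.1 fx.2 fy.2, true) else (fy.1, false)

def pvLoopA (F : Nat) (p : List Int) (t c : List (Int × Int)) : List (Int × Int) → (List (Int × Int)) × (List (Int × Int))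
  | [] => (t, c)
  | e :: es =>
    let u := pvUnionA F p e.1 e.2
    if u.2 then pvLoopA F u.1 (t ++ [e]) c es else pvLoopA F u.1 t (c ++ [e]) es

def find_spanning_tree_and_cycles (n : Int) (edges : List (Int × Int)) : (List (Int × Int)) × (List (Int × Int)) :=
  pvLoopA (n.toNat + edges.length + 1) ((List.range n.toNat).map Int.ofNat) [] [] edges

-- ===== PORT B =====
def pvLoopB (comp : List Int) (t c : List (Int × Int)) : List (Int × Int) → (List (Int × Int)) × (List (Int × Int))
  | [] => (t, c)
  | e :: es =>
    match PySem.List.pyGet? comp e.1, PySem.List.pyGet? comp e.2 with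
    | some cu, some cv =>
      if cu = cv then pvLoopB comp t (c ++ [e]) es
      else pvLoopB (comp.map (fun x => if x = cu then cv else x)) (t ++ [e]) c es
    | _, _ => (t, c)                            -- IndexError: excluded by Pre_

def find_spanning_tree_and_cycles_alt (n : Int) (edges : List (Int × Int)) : (List (Int × Int)) × (List (Int × Int)) :=
  pvLoopB ((List.range n.toNat).map Int.ofNat) [] [] edges

-- ===== PRECONDITION & SPEC =====
-- Pre_ excludes exactly the inputs on which A raises IndexError: an edge endpoint outside [-n, n).
def Pre_find_spanning_tree_and_cycles (n : Int) (edges : List (Int × Int)) : Prop :=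
  ∀ e ∈ edges, (-n ≤ e.1 ∧ e.1 < n) ∧ (-n ≤ e.2 ∧ e.2 < n)
instance (n : Int) (edges : List (Int × Int)) : Decidable (Pre_find_spanning_tree_and_cycles n edges) := by unfold Pre_find_spanning_tree_and_cycles; infer_instance
def pvWitness_find_spanning_tree_and_cycles : Int × (List (Int × Int)) := (3, [(0, 1), (1, 2), (0, 2)])

def Spec_find_spanning_tree_and_cycles (n : Int) (edges : List (Int × Int)) (out : (List (Int × Int)) × (List (Int × Int))) : Prop := out = find_spanning_tree_and_cycles_alt n edges
instance (n : Int) (edges : List (Int × Int)) (out : (List (Int × Int)) × (List (Int × Int))) : Decidable (Spec_find_spanning_tree_and_cycles n edges out) := by unfold Spec_find_spanning_tree_and_cycles; infer_instance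

-- ===== CLAIM (what is proved, stated in full; the proofs are below) =====
def Claim_equal_find_spanning_tree_and_cycles : Prop := ∀ (n : Int) (edges : List (Int × Int)), Dom_find_spanning_tree_and_cycles n edges → Pre_find_spanning_tree_and_cycles n edges → Spec_find_spanning_tree_and_cycles n edges (find_spanning_tree_and_cycles n edges)

-- ===== LEMMAS AND PROOFS =====

def nthI (p : List Int) (j : Nat) : Int := p.getD j 0
def wIdx (len : Nat) (x : Int) : Nat := (if x < 0 then (len : Int) + x else x).toNat

theorem nthI_set (p : List Int) (j i : Nat) (v : Int) (hj : j < p.length) :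
    nthI (p.set j v) i = if i = j then v else nthI p i := by
  simp only [nthI, List.getD]
  by_cases hij : i = j
  · subst hij
    rw [List.getElem?_set_self hj]
    simp
  · rw [List.getElem?_set_ne (fun h => hij h.symm)]
    simp [hij]

theorem pyGet_wIdx (p : List Int) (x : Int) (h : PySem.Raise.InRange p.length x) :
    PySem.List.pyGet? p x = some (nthI p (wIdx p.length x)) ∧ wIdx p.length x < p.length := by
  obtain ⟨h1, h2⟩ := h
  simp only [PySem.List.pyGet?, PySem.List.pyIdx?, wIdx, nthI, List.getD]
  by_cases hx : 0 ≤ x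
  · have hx2 : ¬ x < 0 := by omega
    simp only [hx, h2, hx2, if_true, if_false, Option.bind_some]
    refine ⟨?_, by omega⟩
    rw [List.getElem?_eq_getElem (by omega)]
    simp
  · have hx' : x < 0 := by omega
    have hx2 : ¬ 0 ≤ x := hx
    simp only [hx2, h1, hx', if_true, if_false, Option.bind_some]
    have e1 : ((p.length : Int) + x).toNat = p.length - (-x).toNat := by omega
    rw [e1, List.getElem?_eq_getElem (by omega)]
    refine ⟨by simp, by omega⟩

theorem pySetD_wIdx (p : List Int) (x : Int) (v : Int) (h : PySem.Raise.InRange p.length x) :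
    PySem.List.pySetD p x v = p.set (wIdx p.length x) v := by
  obtain ⟨h1, h2⟩ := h
  simp only [PySem.List.pySetD, PySem.List.pySet?, PySem.List.pyIdx?, wIdx]
  by_cases hx : 0 ≤ x
  · have hx2 : ¬ x < 0 := by omega
    simp [hx, h2, hx2]
  · have hx' : x < 0 := by omega
    simp only [hx, h1, hx', if_true, if_false, Option.map_some, Option.getD_some]
    congr 1
    omega

def ReachesIn (p : List Int) : Nat → Nat → Prop
  | 0, j => nthI p j = (j : Int)
  | k+1, j => nthI p j = (j : Int) ∨ ReachesIn p k (nthI p j).toNat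

theorem root_reaches (p : List Int) (k : Nat) (j : Nat) (h : nthI p j = (j : Int)) : ReachesIn p k j := by
  cases k with
  | zero => exact h
  | succ k => exact Or.inl h

theorem reaches_mono (p : List Int) (k : Nat) : ∀ j, ReachesIn p k j → ReachesIn p (k+1) j := by
  induction k with
  | zero => intro j h; exact Or.inl h
  | succ k ih =>
    intro j h
    cases h with
    | inl h => exact Or.inl h
    | inr h => exact Or.inr (ih _ h)

theorem reachesIn_zero (p : List Int) (j : Nat) : ReachesIn p 0 j ↔ nthI p j = (j : Int) := Iff.rfl
theorem reachesIn_succ (p : List Int) (k j : Nat) :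
    ReachesIn p (k+1) j ↔ (nthI p j = (j : Int) ∨ ReachesIn p k (nthI p j).toNat) := Iff.rfl

theorem reaches_set_root (p : List Int) (jx rt : Nat)
    (hrange : ∀ i, i < p.length → 0 ≤ nthI p i ∧ (nthI p i).toNat < p.length)
    (hjxl : jx < p.length)
    (hrt : nthI p rt = (rt : Int)) (hjx : nthI p jx ≠ (jx : Int)) :
    ∀ k j, j < p.length → ReachesIn p k j → ReachesIn (p.set jx (rt : Int)) k j := by
  have hrtne : rt ≠ jx := fun e => hjx (e ▸ hrt)
  have hrt' : nthI (p.set jx (rt : Int)) rt = (rt : Int) := by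
    rw [nthI_set p jx rt _ hjxl]; simp [hrtne, hrt]
  intro k
  induction k with
  | zero =>
    intro j hj h
    rw [reachesIn_zero] at h ⊢
    have hne : j ≠ jx := fun e => hjx (e ▸ h)
    rw [nthI_set p jx j _ hjxl, if_neg hne]
    exact h
  | succ k ih =>
    intro j hj h
    rw [reachesIn_succ]
    by_cases hje : j = jx
    · right
      rw [nthI_set p jx j _ hjxl, if_pos hje]
      simpa using root_reaches _ k rt hrt'
    · rw [nthI_set p jx j _ hjxl, if_neg hje]
      rw [reachesIn_succ] at h
      cases h with
      | inl h => exact Or.inl h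
      | inr h => exact Or.inr (ih _ ((hrange j hj).2) h)

theorem reaches_set_incr (p : List Int) (px py : Nat)
    (hrange : ∀ i, i < p.length → 0 ≤ nthI p i ∧ (nthI p i).toNat < p.length)
    (hpx : nthI p px = (px : Int)) (hpy : nthI p py = (py : Int)) (hne : px ≠ py)
    (hpxl : px < p.length) (hpyl : py < p.length) :
    ∀ k j, j < p.length → ReachesIn p k j → ReachesIn (p.set px (py : Int)) (k+1) j := by
  have hpy' : nthI (p.set px (py : Int)) py = (py : Int) := by
    rw [nthI_set p px py _ hpxl]; simp [hpy]
  have hroot : ∀ m, ReachesIn (p.set px (py : Int)) m py := fun m => root_reaches _ m py hpy'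
  intro k
  induction k with
  | zero =>
    intro j hj h
    rw [reachesIn_zero] at h
    rw [reachesIn_succ]
    by_cases hje : j = px
    · right
      rw [nthI_set p px j _ hpxl, if_pos hje]
      simpa using hroot 0
    · left
      rw [nthI_set p px j _ hpxl, if_neg hje]
      exact h
  | succ k ih =>
    intro j hj h
    rw [reachesIn_succ]
    by_cases hje : j = px
    · right
      rw [nthI_set p px j _ hpxl, if_pos hje]
      simpa using hroot (k+1)
    · rw [nthI_set p px j _ hpxl, if_neg hje]
      rw [reachesIn_succ] at h
      cases h with
      | inl h => exact Or.inl h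
      | inr h => exact Or.inr (ih _ ((hrange j hj).2) h)

def DSUInv (p c : List Int) : Prop :=
  p.length = c.length ∧
  (∀ j, j < p.length → 0 ≤ nthI p j ∧ (nthI p j).toNat < p.length) ∧
  (∀ j, j < p.length → nthI c (nthI p j).toNat = nthI c j) ∧
  (∀ i j, i < p.length → j < p.length → nthI p i = (i : Int) → nthI p j = (j : Int) → nthI c i = nthI c j → i = j)

theorem wIdx_natCast (len : Nat) (j : Nat) (h : j < len) : wIdx len (j : Int) = j := by
  unfold wIdx
  rw [if_neg (by omega)]
  omega

theorem find_spec (c : List Int) : ∀ (F k : Nat) (p : List Int) (x : Int),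
    DSUInv p c → PySem.Raise.InRange p.length x →
    ReachesIn p k (wIdx p.length x) → k + 2 ≤ F →
    ∃ (p' : List Int) (r : Nat),
      pvFindA F p x = (p', (r : Int)) ∧ p'.length = p.length ∧ DSUInv p' c ∧
      r < p.length ∧ nthI p' r = (r : Int) ∧ nthI c r = nthI c (wIdx p.length x) ∧
      (∀ m i, i < p.length → ReachesIn p m i → ReachesIn p' m i) ∧
      (∀ i, i < p.length → (nthI p' i = (i : Int) ↔ nthI p i = (i : Int))) := by
  intro F
  induction F with
  | zero => intro k p x _ _ _ hF; omega
  | succ F ih =>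
    intro k p x hInv hx hre hF
    obtain ⟨hget, hjl⟩ := pyGet_wIdx p x hx
    set jx := wIdx p.length x with hjxdef
    obtain ⟨hlen, hrange, hlab, hinj⟩ := hInv
    by_cases hroot : nthI p jx = (jx : Int)
    · -- jx is a root
      by_cases hxeq : nthI p jx = x
      · -- parent[x] == x : return immediately
        refine ⟨p, jx, ?_, rfl, ⟨hlen, hrange, hlab, hinj⟩, hjl, hroot, rfl,
          fun m i _ h => h, fun i _ => Iff.rfl⟩
        show pvFindA (F+1) p x = (p, (jx : Int))
        simp only [pvFindA, hget]
        rw [if_pos hxeq, hroot]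
      · -- x < 0 case: parent[x] = jx ≠ x; inner find(jx) returns jx at once, then a no-op write
        have hF1 : F = (F - 1) + 1 := by omega
        have hinner : pvFindA F p (nthI p jx) = (p, (jx : Int)) := by
          rw [hF1, hroot]
          have hg2 : PySem.List.pyGet? p ((jx : Int)) = some ((jx : Int)) := by
            have h := pyGet_wIdx p ((jx : Int)) ⟨by omega, by exact_mod_cast hjl⟩
            rw [h.1, wIdx_natCast _ _ hjl, hroot]
          simp only [pvFindA, hg2, if_true]
        have hset : PySem.List.pySetD p x (jx : Int) = p.set jx (jx : Int) := by
          rw [pySetD_wIdx p x _ hx]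
        have hnoop : ∀ i, nthI (p.set jx (jx : Int)) i = nthI p i := by
          intro i
          rw [nthI_set p jx i _ hjl]
          by_cases hij : i = jx
          · rw [if_pos hij, hij, hroot]
          · rw [if_neg hij]
        have hsetlen : (p.set jx (jx : Int)).length = p.length := by simp
        refine ⟨p.set jx (jx : Int), jx, ?_, hsetlen, ?_, hjl, by rw [hnoop]; exact hroot, rfl, ?_, ?_⟩
        · show pvFindA (F+1) p x = _
          simp only [pvFindA, hget, if_neg hxeq, hinner, hset]
        · -- DSUInv for the no-op write: rewrite pointwise
          refine ⟨by rw [hsetlen]; exact hlen, ?_, ?_, ?_⟩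
          · intro j hj; rw [hsetlen] at hj ⊢; rw [hnoop]; exact hrange j hj
          · intro j hj; rw [hsetlen] at hj; rw [hnoop]; exact hlab j hj
          · intro i j hi hj h1 h2 h3
            rw [hsetlen] at hi hj
            rw [hnoop] at h1 h2
            exact hinj i j hi hj h1 h2 h3
        · -- Reach preservation under no-op write
          intro m i hi h
          clear hre hget
          induction m generalizing i with
          | zero => rw [reachesIn_zero] at h ⊢; rw [hnoop]; exact h
          | succ m ihm =>
            rw [reachesIn_succ] at h ⊢
            rw [hnoop]
            cases h with
            | inl h => exact Or.inl h
            | inr h => exact Or.inr (ihm _ ((hrange i hi).2) h)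
        · intro i hi; rw [hnoop]
    · -- jx not a root: real recursion
      have hxeq : nthI p jx ≠ x := by
        intro h
        -- then x = parent[jx]; x ≥ 0 would give jx = x.toNat hence root; x < 0 gives nonneg = neg
        have h0 : 0 ≤ nthI p jx := (hrange jx hjl).1
        have : 0 ≤ x := by omega
        have : jx = x.toNat := by simp [hjxdef, wIdx]; omega
        exact hroot (by rw [h, this]; omega)
      have hk : ∃ k', k = k' + 1 ∧ ReachesIn p k' (nthI p jx).toNat := by
        cases k with
        | zero => rw [reachesIn_zero] at hre; exact absurd hre hroot
        | succ k' =>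
          rw [reachesIn_succ] at hre
          cases hre with
          | inl h => exact absurd h hroot
          | inr h => exact ⟨k', rfl, h⟩
      obtain ⟨k', hkeq, hre'⟩ := hk
      have hpxin : PySem.Raise.InRange p.length (nthI p jx) :=
        ⟨by have := (hrange jx hjl).1; omega, by have := (hrange jx hjl).2; omega⟩
      have hwpx : wIdx p.length (nthI p jx) = (nthI p jx).toNat := by
        have := (hrange jx hjl).1
        simp [wIdx]
        omega
      obtain ⟨p1, r, heq1, hlen1, hInv1, hrl, hrroot, hrlab, hpres1, hriff1⟩ :=
        ih k' p (nthI p jx) ⟨hlen, hrange, hlab, hinj⟩ hpxin (by rw [hwpx]; exact hre') (by omega)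
      rw [hwpx] at hrlab
      -- r ≠ jx
      have hjx1 : nthI p1 jx ≠ (jx : Int) := fun h => hroot ((hriff1 jx hjl).mp h)
      have hrne : r ≠ jx := fun e => hjx1 (e ▸ hrroot)
      have hset : PySem.List.pySetD p1 x (r : Int) = p1.set jx (r : Int) := by
        rw [pySetD_wIdx p1 x _ (by rw [hlen1]; exact hx)]
        congr 1
        rw [hlen1]
      obtain ⟨hlen1', hrange1, hlab1, hinj1⟩ := hInv1
      have hjl1 : jx < p1.length := by rw [hlen1]; exact hjl
      have hnth : ∀ i, nthI (p1.set jx (r : Int)) i = if i = jx then (r : Int) else nthI p1 i :=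
        fun i => nthI_set p1 jx i _ hjl1
      refine ⟨p1.set jx (r : Int), r, ?_, by simp [hlen1], ?_, hrl, ?_, ?_, ?_, ?_⟩
      · show pvFindA (F+1) p x = _
        simp only [pvFindA, hget, if_neg hxeq, heq1, hset]
      · -- DSUInv
        refine ⟨by simp [hlen1, hlen], ?_, ?_, ?_⟩
        · intro j hj
          simp only [List.length_set] at hj
          rw [List.length_set, hnth]
          by_cases hje : j = jx
          · rw [if_pos hje]; constructor
            · positivity
            · simpa [hlen1] using hrl
          · rw [if_neg hje]; exact hrange1 j hj
        · intro j hj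
          simp only [List.length_set] at hj
          rw [hnth]
          by_cases hje : j = jx
          · rw [if_pos hje, hje]
            simp only [Int.toNat_natCast]
            -- nthI c r = nthI c jx
            rw [hrlab]
            exact hlab jx hjl
          · rw [if_neg hje]; exact hlab1 j hj
        · intro i j hi hj h1 h2 h3
          simp only [List.length_set] at hi hj
          rw [hnth] at h1 h2
          by_cases hie : i = jx
          · rw [if_pos hie] at h1
            have h4 : r = i := by exact_mod_cast h1
            omega
          · by_cases hjee : j = jx
            · rw [if_pos hjee] at h2
              have h4 : r = j := by exact_mod_cast h2
              omega
            · rw [if_neg hie] at h1; rw [if_neg hjee] at h2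
              exact hinj1 i j hi hj h1 h2 h3
      · rw [hnth, if_neg hrne]; exact hrroot
      · rw [hrlab]; exact hlab jx hjl
      · -- reach preservation: p → p1 → set
        intro m i hi h
        have h1 := hpres1 m i hi h
        have hi1 : i < p1.length := by rw [hlen1]; exact hi
        exact reaches_set_root p1 jx r hrange1 hjl1 hrroot hjx1 m i hi1 h1
      · intro i hi
        rw [hnth]
        by_cases hie : i = jx
        · rw [if_pos hie, hie]
          constructor
          · intro h; exact absurd (by exact_mod_cast h : r = jx) hrne
          · intro h; exact absurd h hroot
        · rw [if_neg hie]
          have hi1 : i < p.length := hi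
          exact hriff1 i hi1

theorem union_spec (c : List Int) (F k : Nat) (p : List Int) (x y : Int)
    (hInv : DSUInv p c) (hx : PySem.Raise.InRange p.length x) (hy : PySem.Raise.InRange p.length y)
    (hreach : ∀ j, j < p.length → ReachesIn p k j) (hF : k + 2 ≤ F) :
    ∃ p', pvUnionA F p x y =
        (p', decide (¬ nthI c (wIdx p.length x) = nthI c (wIdx p.length y))) ∧
      p'.length = p.length ∧
      DSUInv p' (if nthI c (wIdx p.length x) = nthI c (wIdx p.length y) then c
              else c.map (fun l => if l = nthI c (wIdx p.length x) then nthI c (wIdx p.length y) else l)) ∧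
      (∀ j, j < p.length → ReachesIn p' (k+1) j) := by
  obtain ⟨hgx, hjxl⟩ := pyGet_wIdx p x hx
  set jx := wIdx p.length x with hjxdef
  set jy := wIdx p.length y with hjydef
  set cu := nthI c jx with hcu
  set cv := nthI c jy with hcv
  obtain ⟨p1, px, heq1, hlen1, hInv1, hpxl, hpxroot, hpxlab, hpres1, hriff1⟩ :=
    find_spec c F k p x hInv hx (hreach jx hjxl) hF
  have hy1 : PySem.Raise.InRange p1.length y := by rw [hlen1]; exact hy
  have hjyl : jy < p.length := (pyGet_wIdx p y hy).2
  have hjy1 : wIdx p1.length y = jy := by rw [hlen1]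
  obtain ⟨p2, py, heq2, hlen2, hInv2, hpyl, hpyroot, hpylab, hpres2, hriff2⟩ :=
    find_spec c F k p1 y hInv1 hy1 (by rw [hjy1]; exact hpres1 k jy hjyl (hreach jy hjyl)) hF
  rw [hjy1] at hpylab
  have hlen21 : p2.length = p.length := by rw [hlen2, hlen1]
  -- px is still a root in p2
  have hpxroot2 : nthI p2 px = (px : Int) := (hriff2 px (by rw [hlen1]; exact hpxl)).mpr hpxroot
  have hpxl2 : px < p2.length := by rw [hlen21]; exact hpxl
  have hpyl2 : py < p2.length := by rw [hlen2]; exact hpyl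
  obtain ⟨hlen2', hrange2, hlab2, hinj2⟩ := hInv2
  -- branch condition: px ≠ py ↔ cu ≠ cv
  have hlabx : nthI c px = cu := hpxlab
  have hlaby : nthI c py = cv := hpylab
  have hiff : px = py ↔ cu = cv := by
    constructor
    · intro h; rw [← hlabx, ← hlaby, h]
    · intro h
      exact hinj2 px py hpxl2 hpyl2 hpxroot2 hpyroot (by rw [hlabx, hlaby, h])
  by_cases hcc : cu = cv
  · have hpp : px = py := hiff.mpr hcc
    refine ⟨p2, ?_, hlen21, by rw [if_pos hcc]; exact ⟨hlen2', hrange2, hlab2, hinj2⟩, ?_⟩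
    · have hd : decide (¬ cu = cv) = false := by simp [hcc]
      unfold pvUnionA
      simp only [heq1, heq2]
      rw [hd, if_neg (by simp [hpp])]
    · intro j hj
      exact reaches_mono p2 k j (hpres2 k j (by rw [hlen1]; exact hj) (hpres1 k j hj (hreach j hj)))
  · have hpp : px ≠ py := fun h => hcc (hiff.mp h)
    have hset : PySem.List.pySetD p2 (px : Int) (py : Int) = p2.set px (py : Int) := by
      rw [pySetD_wIdx p2 _ _ ⟨by omega, by exact_mod_cast hpxl2⟩, wIdx_natCast _ _ hpxl2]
    have hnth : ∀ i, nthI (p2.set px (py : Int)) i = if i = px then (py : Int) else nthI p2 i :=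
      fun i => nthI_set p2 px i _ hpxl2
    set c' := c.map (fun l => if l = cu then cv else l) with hc'
    have hclen : c'.length = c.length := by simp [hc']
    have hcnth : ∀ i, i < c.length → nthI c' i = if nthI c i = cu then cv else nthI c i := by
      intro i hi
      simp only [hc', nthI, List.getD]
      rw [List.getElem?_map, List.getElem?_eq_getElem hi]
      simp
    refine ⟨p2.set px (py : Int), ?_, by simp [hlen21], ?_, ?_⟩
    · have hd : decide (¬ cu = cv) = true := by simp [hcc]
      unfold pvUnionA
      simp only [heq1, heq2]
      rw [hd, if_pos (by simp [hpp]), hset]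
    · rw [if_neg hcc]
      have hlenc : p.length = c.length := hInv.1
      refine ⟨by simp [hlen21, hlenc, hclen], ?_, ?_, ?_⟩
      · intro j hj
        simp only [List.length_set] at hj ⊢
        rw [hnth]
        by_cases hje : j = px
        · rw [if_pos hje]
          exact ⟨by positivity, by simpa using hpyl2⟩
        · rw [if_neg hje]; exact hrange2 j hj
      · intro j hj
        simp only [List.length_set] at hj
        have hjc : j < c.length := by rw [← hlenc, ← hlen21]; exact hj
        rw [hnth]
        by_cases hje : j = px
        · rw [if_pos hje, hje]
          simp only [Int.toNat_natCast]
          rw [hcnth py (by rw [← hlenc, ← hlen21]; exact hpyl2),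
              hcnth px (by rw [← hlenc, ← hlen21]; exact hpxl2)]
          rw [hlabx, hlaby, if_pos rfl, if_neg (fun h => hcc h.symm)]
        · rw [if_neg hje]
          have h1 := hlab2 j hj
          have hpj : (nthI p2 j).toNat < c.length := by rw [← hlenc, ← hlen21]; exact (hrange2 j hj).2
          rw [hcnth _ hpj, hcnth _ hjc, h1]
      · intro i j hi hj h1 h2 h3
        simp only [List.length_set] at hi hj
        rw [hnth] at h1 h2
        have hic : i < c.length := by rw [← hlenc, ← hlen21]; exact hi
        have hjc : j < c.length := by rw [← hlenc, ← hlen21]; exact hj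
        by_cases hie : i = px
        · rw [if_pos hie] at h1
          have h4 : py = i := by exact_mod_cast h1
          omega
        · by_cases hjee : j = px
          · rw [if_pos hjee] at h2
            have h4 : py = j := by exact_mod_cast h2
            omega
          · rw [if_neg hie] at h1
            rw [if_neg hjee] at h2
            rw [hcnth _ hic, hcnth _ hjc] at h3
            -- labels of roots i,j ≠ px are ≠ cu, so f is identity on them
            have hlroot : ∀ m, m < p2.length → m ≠ px → nthI p2 m = (m : Int) → nthI c m ≠ cu := by
              intro m hm hmne hmroot hmcu
              exact hmne (hinj2 m px hm hpxl2 hmroot hpxroot2 (by rw [hmcu, hlabx]))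
            rw [if_neg (hlroot i hi hie h1), if_neg (hlroot j hj hjee h2)] at h3
            exact hinj2 i j hi hj h1 h2 h3
    · intro j hj
      have hj2 : j < p2.length := by rw [hlen21]; exact hj
      exact reaches_set_incr p2 px py hrange2 hpxroot2 hpyroot hpp hpxl2 hpyl2 k j hj2
        (hpres2 k j (by rw [hlen1]; exact hj) (hpres1 k j hj (hreach j hj)))

theorem loop_spec (F : Nat) : ∀ (es : List (Int × Int)) (p c : List Int) (t cy : List (Int × Int)) (k : Nat),
    DSUInv p c →
    (∀ e ∈ es, PySem.Raise.InRange p.length e.1 ∧ PySem.Raise.InRange p.length e.2) →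
    (∀ j, j < p.length → ReachesIn p k j) → k + es.length + 1 ≤ F →
    pvLoopA F p t cy es = pvLoopB c t cy es := by
  intro es
  induction es with
  | nil => intro p c t cy k _ _ _ _; rfl
  | cons e es ihe =>
    intro p c t cy k hInv hedges hreach hF
    obtain ⟨hu, hv⟩ := hedges e (by simp)
    have hlenc : c.length = p.length := hInv.1.symm
    have hucr : PySem.Raise.InRange c.length e.1 := by rw [hlenc]; exact hu
    have hvcr : PySem.Raise.InRange c.length e.2 := by rw [hlenc]; exact hv
    have hgu := pyGet_wIdx c e.1 hucr
    have hgv := pyGet_wIdx c e.2 hvcr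
    have hwu : wIdx c.length e.1 = wIdx p.length e.1 := by rw [hlenc]
    have hwv : wIdx c.length e.2 = wIdx p.length e.2 := by rw [hlenc]
    obtain ⟨p', hueq, hlen', hInv', hreach'⟩ :=
      union_spec c F k p e.1 e.2 hInv hu hv hreach (by simp at hF; omega)
    set cu := nthI c (wIdx p.length e.1) with hcu
    set cv := nthI c (wIdx p.length e.2) with hcv
    have hgu' : PySem.List.pyGet? c e.1 = some cu := by rw [hgu.1, hwu]
    have hgv' : PySem.List.pyGet? c e.2 = some cv := by rw [hgv.1, hwv]
    by_cases hcc : cu = cv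
    · have hb : (pvUnionA F p e.1 e.2).2 = false := by rw [hueq]; simp [hcc]
      have hp' : (pvUnionA F p e.1 e.2).1 = p' := by rw [hueq]
      rw [pvLoopA, pvLoopB, hgu', hgv']
      simp only [hb, hp', Bool.false_eq_true, if_false, if_pos hcc]
      rw [if_pos hcc] at hInv'
      exact ihe p' c t (cy ++ [e]) (k+1) hInv'
        (fun e' he' => by rw [hlen']; exact hedges e' (by simp [he']))
        (fun j hj => hreach' j (by rw [← hlen']; exact hj)) (by simp at hF ⊢; omega)
    · have hb : (pvUnionA F p e.1 e.2).2 = true := by rw [hueq]; simp [hcc]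
      have hp' : (pvUnionA F p e.1 e.2).1 = p' := by rw [hueq]
      rw [pvLoopA, pvLoopB, hgu', hgv']
      simp only [hb, hp', if_true, if_neg hcc]
      rw [if_neg hcc] at hInv'
      exact ihe p' (c.map (fun l => if l = cu then cv else l)) (t ++ [e]) cy (k+1) hInv'
        (fun e' he' => by rw [hlen']; exact hedges e' (by simp [he']))
        (fun j hj => hreach' j (by rw [← hlen']; exact hj)) (by simp at hF ⊢; omega)

theorem top_spec (n : Int) (edges : List (Int × Int))
    (hpre : ∀ e ∈ edges, (-n ≤ e.1 ∧ e.1 < n) ∧ (-n ≤ e.2 ∧ e.2 < n)) :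
    find_spanning_tree_and_cycles n edges = find_spanning_tree_and_cycles_alt n edges := by
  unfold find_spanning_tree_and_cycles find_spanning_tree_and_cycles_alt
  set p0 := (List.range n.toNat).map Int.ofNat with hp0
  have hlen0 : p0.length = n.toNat := by simp [hp0]
  have hnth0 : ∀ j, j < n.toNat → nthI p0 j = (j : Int) := by
    intro j hj
    have h1 : p0[j]? = some ((j : Int)) := by
      rw [hp0, List.getElem?_map, List.getElem?_range hj]
      rfl
    simp [nthI, List.getD, h1]
  apply loop_spec
  · refine ⟨rfl, ?_, ?_, ?_⟩
    · intro j hj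
      rw [hlen0] at hj
      rw [hnth0 j hj]
      constructor <;> [positivity; simpa [hlen0] using hj]
    · intro j hj
      rw [hlen0] at hj
      have h := hnth0 j hj
      rw [h]
      simpa using h
    · intro i j hi hj h1 h2 h3
      rw [hlen0] at hi hj
      rw [hnth0 i hi, hnth0 j hj] at h3
      exact_mod_cast h3
  · intro e he
    obtain ⟨⟨h1, h2⟩, ⟨h3, h4⟩⟩ := hpre e he
    rw [hlen0]
    exact ⟨⟨by omega, by omega⟩, ⟨by omega, by omega⟩⟩
  · intro j hj
    rw [hlen0] at hj
    exact root_reaches p0 0 j (hnth0 j hj)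
  · omega

-- ===== VERDICT (by name: the statement is the Claim_ definition above) =====
theorem find_spanning_tree_and_cycles_spec : Claim_equal_find_spanning_tree_and_cycles := by
  intro n edges _ hpre
  exact top_spec n edges hpre
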